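-- pv_equiv track=rewrite | github.com/RomanCohort/confluencia | tools/md_to_docx_math.py | split_code_segments
-- ===== SOURCE A (Python) =====
-- def split_code_segments(md_text):
--     segments = []
--     cur = []
--     in_code = False
--     for line in md_text.splitlines(keepends=True):
--         if line.strip().startswith('```'):
--             if not in_code:
--                 if cur:
--                     segments.append(('text', ''.join(cur)))
--                     cur = []
--                 in_code = True
--                 cur.append(line)
--             else:
--                 cur.append(line)
--                 segments.append(('code', ''.join(cur)))
--                 cur = []
--                 in_code = False
--         else:
--             cur.append(line)
--     if cur:
--         segments.append(('code' if in_code else 'text', ''.join(cur)))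
--     return segments
-- ===== SOURCE B (Python) =====
-- def _split_at_fence(lines):
--     """Return (prefix before first fence line, suffix starting at it)."""
--     for i, line in enumerate(lines):
--         if line.strip().startswith('```'):
--             return lines[:i], lines[i:]
--     return lines, []
--
--
-- def split_code_segments(md_text):
--     segments = []
--     rest = md_text.splitlines(keepends=True)
--     while rest:
--         text, rest = _split_at_fence(rest)
--         if text:
--             segments.append(('text', ''.join(text)))
--         if not rest:
--             break
--         open_line, tail = rest[0], rest[1:]
--         body, rest = _split_at_fence(tail)
--         if rest:
--             close, rest = rest[0], rest[1:]
--             segments.append(('code', ''.join([open_line] + body + [close])))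
--         else:
--             segments.append(('code', ''.join([open_line] + body)))
--     return segments
-- ===== Notes on version B (the rewrite author's own statement) =====
-- stated objective: alternative
-- what changed: A is a line-by-line state machine carrying an in_code flag and a cur accumulator; B repeatedly splits the remaining lines at the next fence line, emitting a whole text run and a whole open..close (or unterminated) code block per step, with no mode flag.
import Mathlib
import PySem

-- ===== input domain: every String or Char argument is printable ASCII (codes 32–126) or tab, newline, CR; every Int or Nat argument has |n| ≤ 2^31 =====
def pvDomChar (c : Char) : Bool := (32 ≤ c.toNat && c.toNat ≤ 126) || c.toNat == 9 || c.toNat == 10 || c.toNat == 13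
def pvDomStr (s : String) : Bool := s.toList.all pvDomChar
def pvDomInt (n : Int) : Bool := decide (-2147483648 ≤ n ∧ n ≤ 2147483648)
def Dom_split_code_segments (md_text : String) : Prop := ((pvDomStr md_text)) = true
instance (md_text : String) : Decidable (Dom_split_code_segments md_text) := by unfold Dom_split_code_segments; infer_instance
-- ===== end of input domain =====

-- B replaces A's line-by-line in_code state machine by a span-based decomposition:
-- repeatedly split the remaining lines at the next fence, emitting whole text runs and
-- open..close code blocks; same cost, different structure (objective: alternative).

-- ===== shared line-level helpers (both Pythons call the same built-ins) =====

-- md_text.splitlines(keepends=True), ported by hand; exact on Dom, where the only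
-- line breaks are '\n', '\r' and '\r\n' (PySem.Str.splitlines drops the ends).
def pvTakeLine : List Char → List Char × List Char
  | [] => ([], [])
  | c :: rest =>
    if c = '\n' then (['\n'], rest)
    else if c = '\r' then
      match rest with
      | '\n' :: rest' => (['\r', '\n'], rest')
      | _ => (['\r'], rest)
    else
      let (l, r) := pvTakeLine rest
      (c :: l, r)

theorem pvTakeLine_len : ∀ cs : List Char, cs ≠ [] → (pvTakeLine cs).2.length < cs.length := by
  intro cs h
  induction cs with
  | nil => simp at h
  | cons c rest ih =>
    simp only [pvTakeLine]
    split
    · simp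
    · split
      · match rest with
        | [] => simp
        | '\n' :: rest' => simp
        | c' :: rest' => by_cases hc : c' = '\n' <;> simp_all
      · by_cases hr : rest = []
        · subst hr; simp [pvTakeLine]
        · have := ih hr
          simp only [List.length_cons]
          omega

def pvSplitlinesKeep (cs : List Char) : List (List Char) :=
  if h : cs = [] then []
  else
    let p := pvTakeLine cs
    p.1 :: pvSplitlinesKeep p.2
termination_by cs.length
decreasing_by exact pvTakeLine_len cs h

-- line.strip().startswith('```')
def pvIsFence (l : List Char) : Bool :=
  PySem.Chars.startswith (PySem.Chars.strip l) "```".toList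

-- ''.join(lines): joining with the empty separator is exactly concatenation
def pvJoin (ls : List (List Char)) : String := String.ofList ls.flatten

-- ===== PORT A =====
-- state: (segments, cur, in_code)
def pvStepA (st : List (String × String) × List (List Char) × Bool) (line : List Char) :
    List (String × String) × List (List Char) × Bool :=
  let (segs, cur, in_code) := st
  if pvIsFence line then
    if in_code = false then
      ((if cur ≠ [] then segs ++ [("text", pvJoin cur)] else segs), [line], true)
    else
      (segs ++ [("code", pvJoin (cur ++ [line]))], [], false)
  else
    (segs, cur ++ [line], in_code)

def pvFinishA (st : List (String × String) × List (List Char) × Bool) : List (String × String) :=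
  let (segs, cur, in_code) := st
  if cur ≠ [] then segs ++ [((if in_code then "code" else "text"), pvJoin cur)] else segs

def split_code_segments (md_text : String) : List (String × String) :=
  pvFinishA ((pvSplitlinesKeep md_text.toList).foldl pvStepA ([], [], false))

-- ===== PORT B =====
-- _split_at_fence: (lines before the first fence line, lines from it on)
def pvSplitAtFence : List (List Char) → List (List Char) × List (List Char)
  | [] => ([], [])
  | l :: ls =>
    if pvIsFence l then ([], l :: ls)
    else
      let (t, r) := pvSplitAtFence ls
      (l :: t, r)

theorem pvSplitAtFence_snd_le : ∀ ls : List (List Char), (pvSplitAtFence ls).2.length ≤ ls.length := by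
  intro ls
  induction ls with
  | nil => simp [pvSplitAtFence]
  | cons l ls ih =>
    simp only [pvSplitAtFence]
    split
    · simp
    · simpa using Nat.le_succ_of_le ih

-- the while loop of B, as recursion on the remaining lines
def pvGoB (rest : List (List Char)) : List (String × String) :=
  if rest = [] then []
  else
    let p := pvSplitAtFence rest
    let pre := if p.1 ≠ [] then [("text", pvJoin p.1)] else []
    match hr1 : p.2 with
    | [] => pre
    | op :: tail =>
      match hr2 : pvSplitAtFence tail with
      | (body, []) => pre ++ [("code", pvJoin (op :: body))]
      | (body, close :: rest3) => pre ++ [("code", pvJoin ((op :: body) ++ [close]))] ++ pvGoB rest3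
termination_by rest.length
decreasing_by
  have a1 := pvSplitAtFence_snd_le rest
  rw [hr1] at a1
  have a2 := pvSplitAtFence_snd_le tail
  rw [hr2] at a2
  simp at a1 a2
  cases rest with
  | nil => simp at hr1 a1
  | cons x xs => simp at a1 ⊢; omega

def split_code_segments_alt (md_text : String) : List (String × String) :=
  pvGoB (pvSplitlinesKeep md_text.toList)

-- ===== PRECONDITION & SPEC =====
def Spec_split_code_segments (md_text : String) (out : List (String × String)) : Prop := out = split_code_segments_alt md_text
instance (md_text : String) (out : List (String × String)) : Decidable (Spec_split_code_segments md_text out) := by unfold Spec_split_code_segments; infer_instance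

-- ===== CLAIM (what is proved, stated in full; the proofs are below) =====
def Claim_equal_split_code_segments : Prop := ∀ (md_text : String), Dom_split_code_segments md_text → Spec_split_code_segments md_text (split_code_segments md_text)

-- ===== LEMMAS AND PROOFS =====

theorem pvSplitAtFence_eq (ls : List (List Char)) :
    pvSplitAtFence ls = (ls.takeWhile (fun l => !pvIsFence l), ls.dropWhile (fun l => !pvIsFence l)) := by
  induction ls with
  | nil => simp [pvSplitAtFence]
  | cons l ls ih =>
    simp only [pvSplitAtFence, List.takeWhile, List.dropWhile]
    by_cases h : pvIsFence l <;> simp [h, ih]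

theorem pvGoB_text (L t : List (List Char)) (hne : L ≠ []) (h : pvSplitAtFence L = (t, [])) :
    pvGoB L = if t ≠ [] then [("text", pvJoin t)] else [] := by
  rw [pvGoB.eq_def, if_neg hne, h]

theorem pvGoB_open (L t : List (List Char)) (op : List Char) (tail body : List (List Char))
    (hne : L ≠ []) (h : pvSplitAtFence L = (t, op :: tail)) (h2 : pvSplitAtFence tail = (body, [])) :
    pvGoB L = (if t ≠ [] then [("text", pvJoin t)] else []) ++ [("code", pvJoin (op :: body))] := by
  rw [pvGoB.eq_def, if_neg hne, h]
  simp only []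
  rw [h2]

theorem pvGoB_code (L t : List (List Char)) (op : List Char) (tail body : List (List Char))
    (close : List Char) (rest3 : List (List Char))
    (hne : L ≠ []) (h : pvSplitAtFence L = (t, op :: tail)) (h2 : pvSplitAtFence tail = (body, close :: rest3)) :
    pvGoB L = (if t ≠ [] then [("text", pvJoin t)] else []) ++ [("code", pvJoin ((op :: body) ++ [close]))] ++ pvGoB rest3 := by
  rw [pvGoB.eq_def, if_neg hne, h]
  simp only []
  rw [h2]

-- running A's loop over a run of non-fence lines just extends cur
theorem pv_text_run (t : List (List Char)) (ht : ∀ l ∈ t, pvIsFence l = false) :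
    ∀ (rest : List (List Char)) segs cur b,
      List.foldl pvStepA (segs, cur, b) (t ++ rest) = List.foldl pvStepA (segs, cur ++ t, b) rest := by
  induction t with
  | nil => simp
  | cons l t ih =>
    intro rest segs cur b
    have hl : pvIsFence l = false := ht l (by simp)
    have ht' : ∀ x ∈ t, pvIsFence x = false := fun x hx => ht x (by simp [hx])
    simp only [List.cons_append, List.foldl_cons, pvStepA, hl]
    simpa using ih ht' rest segs (cur ++ [l]) b

theorem pv_main : ∀ (n : Nat) (lines : List (List Char)), lines.length ≤ n →
    ∀ segs, pvFinishA (List.foldl pvStepA (segs, [], false) lines) = segs ++ pvGoB lines := by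
  intro n
  induction n with
  | zero =>
    intro lines hlen segs
    have : lines = [] := by
      cases lines with
      | nil => rfl
      | cons a b => simp at hlen
    subst this
    simp [pvGoB, pvFinishA]
  | succ n ih =>
    intro lines hlen segs
    match lines with
    | [] => simp [pvGoB, pvFinishA]
    | l :: ls =>
      set L := l :: ls with hL
      have hLne : L ≠ [] := by rw [hL]; simp
      have hsplit := pvSplitAtFence_eq L
      set t := L.takeWhile (fun x => !pvIsFence x) with htdef
      set r := L.dropWhile (fun x => !pvIsFence x) with hrdef
      have hTR : t ++ r = L := List.takeWhile_append_dropWhile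
      have htf : ∀ x ∈ t, pvIsFence x = false := by
        intro x hx
        have := List.mem_takeWhile_imp (htdef ▸ hx)
        simpa using this
      have hfold1 : List.foldl pvStepA (segs, [], false) L = List.foldl pvStepA (segs, t, false) r := by
        conv_lhs => rw [← hTR]
        simpa using pv_text_run t htf r segs [] false
      cases hr : r with
      | nil =>
        rw [hfold1, hr]
        have htL : t = L := by rw [← hTR, hr, List.append_nil]
        have htne : t ≠ [] := by rw [htL]; exact hLne
        rw [hr] at hsplit
        rw [pvGoB_text L t hLne hsplit]
        simp [pvFinishA, htne]
      | cons op tail =>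
        have hop : pvIsFence op = true := by
          have := List.head?_dropWhile_not (p := fun x => !pvIsFence x) (l := L)
          rw [← hrdef, hr] at this
          simpa using this
        have hstep : pvStepA (segs, t, false) op =
            (segs ++ (if t ≠ [] then [("text", pvJoin t)] else []), [op], true) := by
          simp only [pvStepA, hop, if_true]
          by_cases h : t = [] <;> simp [h]
        set segs' := segs ++ (if t ≠ [] then [("text", pvJoin t)] else []) with hsegs'
        have h3 := pvSplitAtFence_eq tail
        set t2 := tail.takeWhile (fun x => !pvIsFence x) with ht2
        set r2 := tail.dropWhile (fun x => !pvIsFence x) with hr2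
        have hTR2 : t2 ++ r2 = tail := List.takeWhile_append_dropWhile
        have ht2f : ∀ x ∈ t2, pvIsFence x = false := by
          intro x hx
          have := List.mem_takeWhile_imp (ht2 ▸ hx)
          simpa using this
        have hfold2 : List.foldl pvStepA (segs', [op], true) tail
            = List.foldl pvStepA (segs', op :: t2, true) r2 := by
          conv_lhs => rw [← hTR2]
          simpa using pv_text_run t2 ht2f r2 segs' [op] true
        rw [hfold1, hr]
        simp only [List.foldl_cons, hstep, hfold2]
        rw [hr] at hsplit
        cases hr2c : r2 with
        | nil =>
          rw [hr2c] at h3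
          rw [pvGoB_open L t op tail t2 hLne hsplit h3]
          simp [pvFinishA, hsegs']
        | cons close rest3 =>
          rw [hr2c] at h3
          have hclose : pvIsFence close = true := by
            have := List.head?_dropWhile_not (p := fun x => !pvIsFence x) (l := tail)
            rw [← hr2, hr2c] at this
            simpa using this
          have hstep2 : pvStepA (segs', op :: t2, true) close
              = (segs' ++ [("code", pvJoin ((op :: t2) ++ [close]))], [], false) := by
            simp [pvStepA, hclose]
          have hlen3 : rest3.length ≤ n := by
            have e1 : t.length + r.length = L.length := by rw [← hTR]; simp
            have e2 : t2.length + r2.length = tail.length := by rw [← hTR2]; simp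
            rw [hr] at e1; rw [hr2c] at e2
            simp only [List.length_cons] at e1 e2
            have : L.length ≤ n + 1 := hlen
            omega
          simp only [List.foldl_cons, hstep2]
          rw [ih rest3 hlen3 (segs' ++ [("code", pvJoin ((op :: t2) ++ [close]))])]
          rw [pvGoB_code L t op tail t2 close rest3 hLne hsplit h3]
          simp [hsegs']

-- ===== VERDICT (by name: the statement is the Claim_ definition above) =====
theorem split_code_segments_spec : Claim_equal_split_code_segments := by
  intro md _
  unfold Spec_split_code_segments split_code_segments split_code_segments_alt
  simpa using pv_main (pvSplitlinesKeep md.toList).length _ le_rfl []
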